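-- pv_equiv track=rewrite | github.com/Antoni-AGH-WH/Programowanie | Python-gra-project/Gra4.py | produkcja_miasta
-- ===== SOURCE A (Python) =====
-- def produkcja_miasta(construction_que):
--     finished_list = []
--     a = list(construction_que.keys())
--     list_d = a.copy()
--     for element in list_d:
--         t_remaining = construction_que[element]
--         t_remaining = t_remaining - 1
--         if t_remaining == 0:
--             finished_list = finished_list + [element]
--             construction_que.pop(element)
--         else:
--             construction_que[element] = t_remaining
--     return construction_que, finished_list
-- ===== SOURCE B (Python) =====
-- def produkcja_miasta(construction_que):
--     finished_list = [k for k, v in construction_que.items() if v == 1]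
--     for k in finished_list:
--         construction_que.pop(k)
--     for k in construction_que:
--         construction_que[k] -= 1
--     return construction_que, finished_list
-- ===== Notes on version B (the rewrite author's own statement) =====
-- stated objective: simpler
-- what changed: A's single fused loop over the keys (lookup, decrement, conditional pop per key) is reshaped into three plain in-place passes: collect the keys whose timer is 1, pop exactly those, then decrement every surviving entry.
import Mathlib
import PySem

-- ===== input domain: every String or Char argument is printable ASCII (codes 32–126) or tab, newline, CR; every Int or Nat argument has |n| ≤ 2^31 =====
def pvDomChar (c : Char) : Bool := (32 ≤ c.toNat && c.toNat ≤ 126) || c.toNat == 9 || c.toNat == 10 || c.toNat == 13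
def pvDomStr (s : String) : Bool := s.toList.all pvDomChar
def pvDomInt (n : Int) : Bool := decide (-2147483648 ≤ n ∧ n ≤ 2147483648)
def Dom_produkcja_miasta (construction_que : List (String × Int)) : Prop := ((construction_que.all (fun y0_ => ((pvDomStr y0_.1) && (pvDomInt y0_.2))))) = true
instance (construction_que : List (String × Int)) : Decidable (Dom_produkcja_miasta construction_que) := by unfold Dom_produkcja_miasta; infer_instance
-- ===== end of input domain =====

-- B replaces A's single fused loop (per-key lookup, decrement, conditional pop) by three plain passes
-- (collect the keys at 1, pop them, decrement the survivors); equivalence is about the RETURN value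
-- (the Python A and B both mutate the dict in place, to the same final contents).

-- ===== PORT A =====
def produkcja_miasta (construction_que : List (String × Int)) : (List (String × Int)) × List String :=
  let cq : PySem.Dict String Int := PySem.Dict.mk construction_que
  let a := cq.keys
  let list_d := a               -- a.copy()
  let r := list_d.foldl
    (fun (s : PySem.Dict String Int × List String) element =>
      let t_remaining := s.1.getD element 0 - 1   -- construction_que[element]; key present (comes from keys)
      if t_remaining = 0 then (s.1.erase element, s.2 ++ [element])   -- pop's value is discarded: erase
      else (s.1.insert element t_remaining, s.2))
    (cq, [])
  (r.1.items, r.2)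

-- ===== PORT B =====
def produkcja_miasta_alt (construction_que : List (String × Int)) : (List (String × Int)) × List String :=
  let cq : PySem.Dict String Int := PySem.Dict.mk construction_que
  let finished_list := (cq.items.filter (fun p => p.2 == 1)).map Prod.fst
  let cq1 := finished_list.foldl (fun d k => d.erase k) cq            -- pop: key present, value discarded
  let cq2 := cq1.keys.foldl (fun d k => d.modify k 0 (· - 1)) cq1    -- construction_que[k] -= 1; key present
  (cq2.items, finished_list)

-- ===== PRECONDITION & SPEC =====
-- A Python dict has pairwise-distinct keys; association lists with a repeated key represent no dict
-- (A cannot be called on them), so Pre_ excludes exactly those lists.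
def Pre_produkcja_miasta (construction_que : List (String × Int)) : Prop :=
  (construction_que.map Prod.fst).Nodup
instance (construction_que : List (String × Int)) : Decidable (Pre_produkcja_miasta construction_que) := by unfold Pre_produkcja_miasta; infer_instance

def pvWitness_produkcja_miasta : (List (String × Int)) := [("dom", 1), ("mur", 3), ("wieza", 0)]

def Spec_produkcja_miasta (construction_que : List (String × Int)) (out : (List (String × Int)) × List String) : Prop := out = produkcja_miasta_alt construction_que
instance (construction_que : List (String × Int)) (out : (List (String × Int)) × List String) : Decidable (Spec_produkcja_miasta construction_que out) := by unfold Spec_produkcja_miasta; infer_instance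

-- ===== CLAIM (what is proved, stated in full; the proofs are below) =====
def Claim_equal_produkcja_miasta : Prop := ∀ (construction_que : List (String × Int)), Dom_produkcja_miasta construction_que → Pre_produkcja_miasta construction_que → Spec_produkcja_miasta construction_que (produkcja_miasta construction_que)

-- ===== LEMMAS AND PROOFS =====

/-- `find?` by key in a list whose prefix avoids the key hits the middle pair. -/
lemma pv_find_mid (pref rest : List (String × Int)) (k : String) (v : Int)
    (hp : k ∉ pref.map Prod.fst) :
    List.find? (fun p => p.1 == k) (pref ++ (k, v) :: rest) = some (k, v) := by
  induction pref with
  | nil =>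
    rw [List.nil_append, List.find?_cons]
    simp
  | cons a t ih =>
    simp only [List.map_cons, List.mem_cons, not_or] at hp
    have hb : (a.1 == k) = false := beq_eq_false_iff_ne.mpr (fun hh => hp.1 hh.symm)
    rw [List.cons_append, List.find?_cons, hb]
    exact ih hp.2

lemma pv_getD_mid (pref rest : List (String × Int)) (k : String) (v d0 : Int)
    (hp : k ∉ pref.map Prod.fst) :
    (PySem.Dict.mk (pref ++ (k, v) :: rest)).getD k d0 = v := by
  simp [PySem.Dict.getD, PySem.Dict.get?, pv_find_mid pref rest k v hp]

lemma pv_filter_ne_key (l : List (String × Int)) (k : String) (h : k ∉ l.map Prod.fst) :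
    l.filter (fun p => !(p.1 == k)) = l := by
  induction l with
  | nil => rfl
  | cons a t ih =>
    simp only [List.map_cons, List.mem_cons, not_or] at h
    have hb : (a.1 == k) = false := beq_eq_false_iff_ne.mpr (fun hh => h.1 hh.symm)
    rw [List.filter_cons]
    simp only [hb, Bool.not_false, if_pos]
    rw [ih h.2]

lemma pv_erase_mid (pref rest : List (String × Int)) (k : String) (v : Int)
    (hp : k ∉ pref.map Prod.fst) (hr : k ∉ rest.map Prod.fst) :
    (PySem.Dict.mk (pref ++ (k, v) :: rest)).erase k = PySem.Dict.mk (pref ++ rest) := by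
  simp only [PySem.Dict.erase, List.filter_append, List.filter_cons,
    pv_filter_ne_key pref k hp, pv_filter_ne_key rest k hr]
  simp

lemma pv_map_ne_key (l : List (String × Int)) (k : String) (t : Int) (h : k ∉ l.map Prod.fst) :
    l.map (fun p => if p.1 = k then (k, t) else p) = l := by
  induction l with
  | nil => rfl
  | cons a tl ih =>
    simp only [List.map_cons, List.mem_cons, not_or] at h
    rw [List.map_cons, if_neg (fun hh => h.1 hh.symm), ih h.2]

lemma pv_insert_mid (pref rest : List (String × Int)) (k : String) (v t : Int)
    (hp : k ∉ pref.map Prod.fst) (hr : k ∉ rest.map Prod.fst) :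
    (PySem.Dict.mk (pref ++ (k, v) :: rest)).insert k t = PySem.Dict.mk (pref ++ (k, t) :: rest) := by
  have hc : (PySem.Dict.mk (pref ++ (k, v) :: rest)).contains k = true := by
    rw [PySem.Dict.contains_iff_mem_keys]
    simp [PySem.Dict.keys]
  simp only [PySem.Dict.insert, hc, if_pos]
  simp only [List.map_append, List.map_cons, beq_iff_eq, if_pos]
  rw [pv_map_ne_key pref k t hp, pv_map_ne_key rest k t hr]

/-- A's fused loop, characterised: processed prefix `pref` untouched, the loop runs over `rest`. -/
lemma pv_loopA (rest : List (String × Int)) : ∀ (pref : List (String × Int)) (fin : List String),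
    ((pref ++ rest).map Prod.fst).Nodup →
    (rest.map Prod.fst).foldl
      (fun (s : PySem.Dict String Int × List String) element =>
        let t_remaining := s.1.getD element 0 - 1
        if t_remaining = 0 then (s.1.erase element, s.2 ++ [element])
        else (s.1.insert element t_remaining, s.2))
      (PySem.Dict.mk (pref ++ rest), fin)
    = (PySem.Dict.mk (pref ++ rest.filterMap (fun p => if p.2 = 1 then none else some (p.1, p.2 - 1))),
       fin ++ (rest.filter (fun p => p.2 == 1)).map Prod.fst) := by
  induction rest with
  | nil => intro pref fin _; simp
  | cons p rest ih =>
    intro pref fin hnd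
    obtain ⟨k, v⟩ := p
    have hnd' := hnd
    simp only [List.map_append, List.map_cons, List.nodup_append] at hnd'
    have hp : k ∉ pref.map Prod.fst := fun hmem => hnd'.2.2 k hmem k (by simp) rfl
    have hr : k ∉ rest.map Prod.fst := by
      have := hnd'.2.1; simp only [List.nodup_cons] at this; exact this.1
    simp only [List.map_cons, List.foldl_cons]
    rw [pv_getD_mid pref rest k v 0 hp]
    by_cases hv : v = 1
    · subst hv
      rw [if_pos (by norm_num)]
      rw [pv_erase_mid pref rest k 1 hp hr]
      have hnd2 : ((pref ++ rest).map Prod.fst).Nodup := by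
        simp only [List.map_append, List.nodup_append]
        refine ⟨hnd'.1, (List.nodup_cons.mp hnd'.2.1).2, ?_⟩
        intro a ha b hb
        exact hnd'.2.2 a ha b (by simp [hb])
      rw [ih pref (fin ++ [k]) hnd2]
      simp [List.append_assoc]
    · have hne : ¬ (v - 1 = 0) := by omega
      rw [if_neg hne]
      rw [pv_insert_mid pref rest k v (v - 1) hp hr]
      have hass : pref ++ (k, v - 1) :: rest = (pref ++ [(k, v - 1)]) ++ rest := by simp
      have hnd2 : (((pref ++ [(k, v - 1)]) ++ rest).map Prod.fst).Nodup := by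
        have he : ((pref ++ [(k, v - 1)]) ++ rest).map Prod.fst
             = (pref ++ (k, v) :: rest).map Prod.fst := by simp
        rw [he]; exact hnd
      rw [hass, ih (pref ++ [(k, v - 1)]) fin hnd2]
      have hfv : ((v : Int) == 1) = false := beq_eq_false_iff_ne.mpr hv
      simp [hfv, hv, List.append_assoc]

/-- B's erase pass: popping a list of keys filters the items. -/
lemma pv_foldl_erase (ks : List String) : ∀ (d : List (String × Int)),
    ks.foldl (fun (d : PySem.Dict String Int) k => d.erase k) (PySem.Dict.mk d)
    = PySem.Dict.mk (d.filter (fun p => !(decide (p.1 ∈ ks)))) := by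
  induction ks with
  | nil => intro d; simp
  | cons k ks ih =>
    intro d
    simp only [List.foldl_cons]
    rw [show (PySem.Dict.mk d).erase k = PySem.Dict.mk (d.filter (fun p => !(p.1 == k))) from by
      simp [PySem.Dict.erase]]
    rw [ih]
    congr 1
    rw [List.filter_filter]
    apply List.filter_congr
    intro p _
    by_cases h1 : p.1 = k <;> simp [h1]

/-- B's decrement pass, characterised the same way as A's loop. -/
lemma pv_loopB (rest : List (String × Int)) : ∀ (pref : List (String × Int)),
    ((pref ++ rest).map Prod.fst).Nodup →
    (rest.map Prod.fst).foldl
      (fun (d : PySem.Dict String Int) k => d.modify k 0 (· - 1))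
      (PySem.Dict.mk (pref ++ rest))
    = PySem.Dict.mk (pref ++ rest.map (fun p => (p.1, p.2 - 1))) := by
  induction rest with
  | nil => intro pref _; simp
  | cons p rest ih =>
    intro pref hnd
    obtain ⟨k, v⟩ := p
    have hnd' := hnd
    simp only [List.map_append, List.map_cons, List.nodup_append] at hnd'
    have hp : k ∉ pref.map Prod.fst := fun hmem => hnd'.2.2 k hmem k (by simp) rfl
    have hr : k ∉ rest.map Prod.fst := by
      have := hnd'.2.1; simp only [List.nodup_cons] at this; exact this.1
    simp only [List.map_cons, List.foldl_cons]
    rw [show (PySem.Dict.mk (pref ++ (k, v) :: rest)).modify k 0 (· - 1)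
        = PySem.Dict.mk (pref ++ (k, v - 1) :: rest) from by
      simp only [PySem.Dict.modify]
      rw [pv_getD_mid pref rest k v 0 hp, pv_insert_mid pref rest k v (v - 1) hp hr]]
    have hass : pref ++ (k, v - 1) :: rest = (pref ++ [(k, v - 1)]) ++ rest := by simp
    have hnd2 : (((pref ++ [(k, v - 1)]) ++ rest).map Prod.fst).Nodup := by
      have he : ((pref ++ [(k, v - 1)]) ++ rest).map Prod.fst
           = (pref ++ (k, v) :: rest).map Prod.fst := by simp
      rw [he]; exact hnd
    rw [hass, ih (pref ++ [(k, v - 1)]) hnd2]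
    simp [List.append_assoc]

lemma pv_filterMap_eq (q : List (String × Int)) :
    q.filterMap (fun p => if p.2 = 1 then none else some (p.1, p.2 - 1))
    = (q.filter (fun p => !(p.2 == 1))).map (fun p => (p.1, p.2 - 1)) := by
  induction q with
  | nil => rfl
  | cons p t ih =>
    by_cases h : p.2 = 1 <;> simp [h, ih]

/-- For nodup keys, a key is among the finished keys iff its value is 1. -/
lemma pv_mem_fin (q : List (String × Int)) (hnd : (q.map Prod.fst).Nodup)
    (p : String × Int) (hp : p ∈ q) :
    (p.1 ∈ (q.filter (fun p => p.2 == 1)).map Prod.fst) ↔ p.2 = 1 := by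
  constructor
  · intro h
    simp only [List.mem_map, List.mem_filter] at h
    obtain ⟨p', ⟨hp', hv'⟩, hk⟩ := h
    have hpp : p' = p := List.inj_on_of_nodup_map hnd hp' hp hk
    subst hpp
    simpa using hv'
  · intro h
    exact List.mem_map.mpr ⟨p, List.mem_filter.mpr ⟨hp, by simpa using h⟩, rfl⟩

-- ===== VERDICT (by name: the statement is the Claim_ definition above) =====
theorem produkcja_miasta_spec : Claim_equal_produkcja_miasta := by
  intro q _ hpre
  have hndq : (q.map Prod.fst).Nodup := hpre
  simp only [Spec_produkcja_miasta, produkcja_miasta, produkcja_miasta_alt]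
  have hkeys : ∀ l : List (String × Int), (PySem.Dict.mk l).keys = l.map Prod.fst := fun _ => rfl
  rw [hkeys q]
  -- A side
  have hA := pv_loopA q [] [] (by simpa using hndq)
  simp only [List.nil_append] at hA
  rw [hA]
  -- B side: erase pass
  have hB1 := pv_foldl_erase ((q.filter (fun p => p.2 == 1)).map Prod.fst) q
  have hfilt : q.filter (fun p => !(decide (p.1 ∈ (q.filter (fun p => p.2 == 1)).map Prod.fst)))
      = q.filter (fun p => !(p.2 == 1)) := by
    apply List.filter_congr
    intro p hp
    have hm := pv_mem_fin q hndq p hp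
    by_cases h1 : p.2 = 1 <;> simp [h1, hm]
  rw [hfilt] at hB1
  rw [hB1]
  -- B side: decrement pass
  have hsub : List.Sublist ((q.filter (fun p => !(p.2 == 1))).map Prod.fst) (q.map Prod.fst) :=
    List.filter_sublist.map Prod.fst
  have hnd2 : ((q.filter (fun p => !(p.2 == 1))).map Prod.fst).Nodup := hndq.sublist hsub
  rw [hkeys (q.filter (fun p => !(p.2 == 1)))]
  have hB2 := pv_loopB (q.filter (fun p => !(p.2 == 1))) [] (by simpa using hnd2)
  simp only [List.nil_append] at hB2
  rw [hB2]
  simp [pv_filterMap_eq q]
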